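-- pv_equiv track=rewrite | github.com/Miandari/InfoHarbor | src/processors/postprocessor.py | _apply_elder_friendly_formatting
-- ===== SOURCE A (Python) =====
-- def _apply_elder_friendly_formatting(text: str) -> str:
--     """Apply elder-friendly text formatting"""
--     # Break up long paragraphs
--     sentences = text.split('. ')
--
--     # Group sentences into shorter paragraphs
--     paragraphs = []
--     current_paragraph = []
--
--     for sentence in sentences:
--         current_paragraph.append(sentence)
--
--         # Start new paragraph after 2-3 sentences
--         if len(current_paragraph) >= 3:
--             paragraphs.append('. '.join(current_paragraph) + '.')
--             current_paragraph = []
--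
--     # Add remaining sentences
--     if current_paragraph:
--         paragraphs.append('. '.join(current_paragraph))
--
--     # Join with double line breaks for readability
--     return '\n\n'.join(paragraphs)
-- ===== SOURCE B (Python) =====
-- def _apply_elder_friendly_formatting(text: str) -> str:
--     """Apply elder-friendly text formatting (batched slice-then-map version)"""
--     sentences = text.split('. ')
--     chunks = [sentences[i:i + 3] for i in range(0, len(sentences), 3)]
--     return '\n\n'.join(
--         '. '.join(chunk) + ('.' if len(chunk) == 3 else '')
--         for chunk in chunks
--     )
-- ===== Notes on version B (the rewrite author's own statement) =====
-- stated objective: simpler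
-- what changed: Replaces the running accumulator/counter loop with a flush at 3 by direct index-slicing of the sentence list into chunks of 3, each mapped to a paragraph and joined once.
import Mathlib
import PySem

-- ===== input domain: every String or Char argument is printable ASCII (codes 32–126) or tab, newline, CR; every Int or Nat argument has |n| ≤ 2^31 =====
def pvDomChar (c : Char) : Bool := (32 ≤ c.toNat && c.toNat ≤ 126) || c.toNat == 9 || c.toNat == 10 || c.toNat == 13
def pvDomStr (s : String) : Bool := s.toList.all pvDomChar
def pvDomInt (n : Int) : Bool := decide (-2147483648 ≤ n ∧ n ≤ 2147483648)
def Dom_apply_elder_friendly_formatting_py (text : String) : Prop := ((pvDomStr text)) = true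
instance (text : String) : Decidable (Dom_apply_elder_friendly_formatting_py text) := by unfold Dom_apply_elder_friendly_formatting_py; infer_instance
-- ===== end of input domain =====

-- B replaces A's accumulator/flush loop by slicing the sentence list into chunks of 3 and mapping each to a paragraph (objective: simpler).

-- ===== PORT A =====
-- loop body of A's for-loop: append, flush when the current paragraph reaches 3 sentences
def pvStep (st : List String × List String) (sentence : String) : List String × List String :=
  let cur := st.2 ++ [sentence]
  if cur.length ≥ 3 then (st.1 ++ [PySem.Str.join ". " cur ++ "."], [])
  else (st.1, cur)

-- A's trailing 'if current_paragraph: paragraphs.append(...)'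
def pvFinalize (st : List String × List String) : List String :=
  if st.2 ≠ [] then st.1 ++ [PySem.Str.join ". " st.2] else st.1

def apply_elder_friendly_formatting_py (text : String) : String :=
  -- sep ". " is nonempty, so split? is always some; getD is never the default
  let sentences := (PySem.Str.split? text ". ").getD []
  PySem.Str.join "\n\n" (pvFinalize (sentences.foldl pvStep ([], [])))

-- ===== PORT B =====
-- chunks of 3: the recursive rendering of Source B's [sentences[i:i+3] for i in range(0, len, 3)]
def pvChunks3 : List String → List (List String)
  | [] => []
  | [a] => [[a]]
  | [a, b] => [[a, b]]
  | a :: b :: c :: rest => [a, b, c] :: pvChunks3 rest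

def apply_elder_friendly_formatting_py_alt (text : String) : String :=
  let sentences := (PySem.Str.split? text ". ").getD []
  PySem.Str.join "\n\n" ((pvChunks3 sentences).map
    (fun chunk => PySem.Str.join ". " chunk ++ (if chunk.length == 3 then "." else "")))

-- ===== PRECONDITION & SPEC =====
def Spec_apply_elder_friendly_formatting_py (text : String) (out : String) : Prop := out = apply_elder_friendly_formatting_py_alt text
instance (text : String) (out : String) : Decidable (Spec_apply_elder_friendly_formatting_py text out) := by unfold Spec_apply_elder_friendly_formatting_py; infer_instance

-- ===== CLAIM (what is proved, stated in full; the proofs are below) =====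
def Claim_equal_apply_elder_friendly_formatting_py : Prop := ∀ (text : String), Dom_apply_elder_friendly_formatting_py text → Spec_apply_elder_friendly_formatting_py text (apply_elder_friendly_formatting_py text)

-- ===== LEMMAS AND PROOFS =====

lemma pvFold_chunks (xs : List String) : ∀ acc : List String,
    pvFinalize (List.foldl pvStep (acc, ([] : List String)) xs)
      = acc ++ (pvChunks3 xs).map
          (fun chunk => PySem.Str.join ". " chunk ++ (if chunk.length == 3 then "." else "")) := by
  induction xs using pvChunks3.induct with
  | case1 => intro acc; simp [pvFinalize, pvChunks3]
  | case2 a => intro acc; simp [pvStep, pvFinalize, pvChunks3]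
  | case3 a b => intro acc; simp [pvStep, pvFinalize, pvChunks3]
  | case4 a b c rest ih =>
    intro acc
    simp only [List.foldl, pvStep, pvChunks3, List.map]
    norm_num
    rw [ih]
    simp

theorem pv_main (text : String) :
    apply_elder_friendly_formatting_py text = apply_elder_friendly_formatting_py_alt text := by
  unfold apply_elder_friendly_formatting_py apply_elder_friendly_formatting_py_alt
  simp only [pvFold_chunks, List.nil_append]

-- ===== VERDICT (by name: the statement is the Claim_ definition above) =====
theorem apply_elder_friendly_formatting_py_spec : Claim_equal_apply_elder_friendly_formatting_py := by
  intro text _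
  unfold Spec_apply_elder_friendly_formatting_py
  exact pv_main text
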